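-- pv_equiv track=rewrite | github.com/ssasso/netsim-topologies | multivendor-evpn/test2.3/mclagcluster_plugin.py | transform_vtep_list
-- ===== SOURCE A (Python) =====
-- def transform_vtep_list(original, vteps_replacement, myself = ''):
--     vteps = []
--     for vt in original:
--         if vt in vteps_replacement:
--             repl = vteps_replacement[vt]
--             if repl != myself:
--                 vteps.append(vteps_replacement[vt])
--         else:
--             vteps.append(vt)
--     return list(dict.fromkeys(vteps))
-- ===== SOURCE B (Python) =====
-- def transform_vtep_list(original, vteps_replacement, myself=''):
--     # Map/filter in one comprehension, then dedup by repeatedly taking the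
--     # head and filtering all later duplicates out of the remainder
--     # (no hash-based seen structure, no dict.fromkeys).
--     pending = [vteps_replacement[vt] if vt in vteps_replacement else vt
--                for vt in original
--                if vt not in vteps_replacement or vteps_replacement[vt] != myself]
--     result = []
--     while pending:
--         head = pending[0]
--         result.append(head)
--         pending = [x for x in pending[1:] if x != head]
--     return result
-- ===== Notes on version B (the rewrite author's own statement) =====
-- stated objective: alternative
-- what changed: Replaces the loop-with-branches plus trailing dict.fromkeys with one map/filter comprehension followed by a hash-free dedup that repeatedly takes the head and filters its later duplicates out of the remainder.
import Mathlib
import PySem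

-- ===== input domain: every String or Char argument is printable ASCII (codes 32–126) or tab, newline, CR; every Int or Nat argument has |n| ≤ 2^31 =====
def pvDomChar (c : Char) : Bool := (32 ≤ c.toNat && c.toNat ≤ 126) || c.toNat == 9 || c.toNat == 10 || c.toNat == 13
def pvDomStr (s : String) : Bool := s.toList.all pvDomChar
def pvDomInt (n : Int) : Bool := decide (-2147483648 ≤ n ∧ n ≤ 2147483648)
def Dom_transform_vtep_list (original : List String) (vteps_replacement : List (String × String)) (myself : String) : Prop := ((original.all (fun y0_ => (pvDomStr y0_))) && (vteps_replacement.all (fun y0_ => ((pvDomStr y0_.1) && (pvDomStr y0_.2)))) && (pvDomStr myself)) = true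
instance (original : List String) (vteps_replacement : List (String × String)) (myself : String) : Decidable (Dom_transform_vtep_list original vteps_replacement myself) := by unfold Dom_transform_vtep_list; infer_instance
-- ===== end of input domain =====

-- B replaces A's loop-plus-dict.fromkeys with a map/filter comprehension followed by a hash-free
-- head-and-filter dedup; same return value, no speed claim.

-- ===== PORT A =====
-- A: build vteps with a loop over original, then dedup via list(dict.fromkeys(vteps)).
def transform_vtep_list (original : List String) (vteps_replacement : List (String × String)) (myself : String) : List String :=
  let vteps := original.foldl (fun vteps vt =>
    -- 'vt in dict' / 'dict[vt]' as first-match lookup on the association list (convention)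
    if (vteps_replacement.lookup vt).isSome then
      let repl := (vteps_replacement.lookup vt).getD ""   -- lookup guarded by 'in': never raises
      if repl ≠ myself then vteps ++ [(vteps_replacement.lookup vt).getD ""] else vteps
    else vteps ++ [vt]) []
  PySem.List.dedup vteps

-- ===== PORT B =====
-- B's while loop: take the head, append it, filter it out of the remainder.
def pvHeadFilterDedup (result : List String) : List String → List String
  | [] => result
  | head :: rest =>
      pvHeadFilterDedup (result ++ [head]) (rest.filter (fun x => x ≠ head))
termination_by l => l.length
decreasing_by
  simp only [List.length_unattach, List.length_cons]
  exact Nat.lt_succ_of_le (le_trans (List.length_filter_le _ _) (by simp))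

-- B: the comprehension (filter + map over original), then the head-and-filter dedup loop.
def transform_vtep_list_alt (original : List String) (vteps_replacement : List (String × String)) (myself : String) : List String :=
  let pending := original.filterMap (fun vt =>
    if ¬ (vteps_replacement.lookup vt).isSome ∨ (vteps_replacement.lookup vt).getD "" ≠ myself then
      some (if (vteps_replacement.lookup vt).isSome then (vteps_replacement.lookup vt).getD "" else vt)
    else none)
  pvHeadFilterDedup [] pending

-- ===== PRECONDITION & SPEC =====
def Spec_transform_vtep_list (original : List String) (vteps_replacement : List (String × String)) (myself : String) (out : List String) : Prop := out = transform_vtep_list_alt original vteps_replacement myself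
instance (original : List String) (vteps_replacement : List (String × String)) (myself : String) (out : List String) : Decidable (Spec_transform_vtep_list original vteps_replacement myself out) := by unfold Spec_transform_vtep_list; infer_instance

-- ===== CLAIM (what is proved, stated in full; the proofs are below) =====
def Claim_equal_transform_vtep_list : Prop := ∀ (original : List String) (vteps_replacement : List (String × String)) (myself : String), Dom_transform_vtep_list original vteps_replacement myself → Spec_transform_vtep_list original vteps_replacement myself (transform_vtep_list original vteps_replacement myself)

-- ===== LEMMAS AND PROOFS =====

-- the value each element emits (none = A appends nothing / B's comprehension filters it out)
def pvEmit (d : List (String × String)) (myself vt : String) : Option String :=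
  if (d.lookup vt).isSome then
    if (d.lookup vt).getD "" = myself then none else some ((d.lookup vt).getD "")
  else some vt

-- A's loop builds the filterMap of pvEmit
theorem pvA_loop (d : List (String × String)) (myself : String) (l : List String) (acc : List String) :
    l.foldl (fun vteps vt =>
      if (d.lookup vt).isSome then
        let repl := (d.lookup vt).getD ""
        if repl ≠ myself then vteps ++ [(d.lookup vt).getD ""] else vteps
      else vteps ++ [vt]) acc = acc ++ l.filterMap (pvEmit d myself) := by
  induction l generalizing acc with
  | nil => simp
  | cons vt rest ih =>
    simp only [List.foldl_cons, List.filterMap_cons, pvEmit, ne_eq, ite_not] at ih ⊢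
    split_ifs with h1 h2 <;> simp [*]

-- B's comprehension emits the same values
theorem pvB_emit (d : List (String × String)) (myself : String) (l : List String) :
    l.filterMap (fun vt =>
      if ¬ (d.lookup vt).isSome ∨ (d.lookup vt).getD "" ≠ myself then
        some (if (d.lookup vt).isSome then (d.lookup vt).getD "" else vt)
      else none) = l.filterMap (pvEmit d myself) := by
  apply List.filterMap_congr
  intro vt _
  unfold pvEmit
  split_ifs <;> tauto

-- folding Set.add ignores the occurrences of an element already in the accumulator
theorem pvFoldl_add_filter (h : String) (acc : List String) (hmem : h ∈ acc) (l : List String) :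
    l.foldl PySem.Set.add acc = (l.filter (fun x => x ≠ h)).foldl PySem.Set.add acc := by
  induction l generalizing acc with
  | nil => rfl
  | cons x t ih =>
    by_cases hx : x = h
    · subst hx
      have : PySem.Set.add acc x = acc := PySem.Set.add_of_mem hmem
      simp [this, ih acc hmem]
    · have hmem' : h ∈ PySem.Set.add acc x := by
        unfold PySem.Set.add; split <;> simp [hmem]
      simp [hx, ih _ hmem']

-- the head-and-filter loop computes the Set.add fold when nothing pending is already in result
theorem pvHeadFilterDedup_eq (n : Nat) : ∀ (l : List String), l.length ≤ n → ∀ (res : List String),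
    (∀ x ∈ l, x ∉ res) → pvHeadFilterDedup res l = l.foldl PySem.Set.add res := by
  induction n with
  | zero =>
    intro l hl res _
    have hnil : l = [] := List.eq_nil_of_length_eq_zero (Nat.le_zero.mp hl)
    subst hnil
    rw [pvHeadFilterDedup.eq_def]
    rfl
  | succ n ih =>
    intro l hl res hres
    match l with
    | [] => rw [pvHeadFilterDedup.eq_def]; rfl
    | head :: rest =>
      have hh : head ∉ res := hres head (by simp)
      have hadd : PySem.Set.add res head = res ++ [head] := PySem.Set.add_of_not_mem hh
      have hlen : (rest.filter (fun x => x ≠ head)).length ≤ n := by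
        have := List.length_filter_le (fun x => decide (x ≠ head)) rest
        simp at hl
        omega
      have hpre : ∀ x ∈ rest.filter (fun x => x ≠ head), x ∉ res ++ [head] := by
        intro x hx
        simp only [List.mem_filter, decide_eq_true_eq] at hx
        simp [hres x (by simp [hx.1]), hx.2]
      rw [pvHeadFilterDedup.eq_def]
      show pvHeadFilterDedup (res ++ [head]) (List.filter (fun x => decide (x ≠ head)) rest) =
        List.foldl PySem.Set.add res (head :: rest)
      rw [ih _ hlen _ hpre, List.foldl_cons, hadd]
      exact (pvFoldl_add_filter head (res ++ [head]) (by simp) rest).symm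

-- ===== VERDICT (by name: the statement is the Claim_ definition above) =====
theorem transform_vtep_list_spec : Claim_equal_transform_vtep_list := by
  intro original d myself _
  show transform_vtep_list original d myself = transform_vtep_list_alt original d myself
  unfold transform_vtep_list transform_vtep_list_alt
  rw [pvA_loop, pvB_emit, List.nil_append,
    pvHeadFilterDedup_eq (List.filterMap (pvEmit d myself) original).length _ le_rfl _ (by simp),
    PySem.List.dedup_eq_ofList, PySem.Set.ofList_eq_foldl]
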